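-- pv_equiv track=rewrite | github.com/hzi09/Coding_Test | 프로그래머스/0/181881. 조건에 맞게 수열 변환하기 2/조건에 맞게 수열 변환하기 2.py | solution
-- ===== SOURCE A (Python) =====
-- def solution(arr):
--     cnt = 0
--
--     while True :
--         change = []
--         for i in arr :
--             if i > 50 and i % 2 == 0 :
--                 change.append(i//2)
--             elif i < 50 and i % 2 == 1 :
--                 change.append(i*2+1)
--             else :
--                 change.append(i)
--         if arr != change :
--             cnt += 1
--             arr = change
--         else :
--             return cnt
-- ===== SOURCE B (Python) =====
-- def solution(arr):
--     best = 0
--     for x in arr: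
--         k = 0
--         while True:
--             if x > 50 and x % 2 == 0:
--                 nxt = x // 2
--             elif x < 50 and x % 2 == 1:
--                 nxt = x * 2 + 1
--             else:
--                 nxt = x
--             if nxt == x:
--                 break
--             x = nxt
--             k += 1
--         if k > best:
--             best = k
--     return best
-- ===== Notes on version B (the rewrite author's own statement) =====
-- stated objective: alternative
-- what changed: Replaces the repeated whole-array rebuild-and-compare loop by independent per-element convergence counting: for each element an inner loop counts the steps until the transform rule fixes it, and the answer is the maximum step count, since the global iteration count equals the max per-element step count.
import Mathlib
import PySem

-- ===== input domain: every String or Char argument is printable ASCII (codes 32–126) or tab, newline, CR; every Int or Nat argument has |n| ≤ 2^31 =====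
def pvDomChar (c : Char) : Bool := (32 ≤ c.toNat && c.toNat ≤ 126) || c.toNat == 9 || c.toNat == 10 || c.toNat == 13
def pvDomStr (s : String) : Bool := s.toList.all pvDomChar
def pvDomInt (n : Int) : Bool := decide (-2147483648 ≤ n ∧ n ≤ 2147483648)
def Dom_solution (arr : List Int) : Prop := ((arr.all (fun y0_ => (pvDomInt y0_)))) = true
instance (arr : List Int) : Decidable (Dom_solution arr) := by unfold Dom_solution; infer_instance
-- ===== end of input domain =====

-- B replaces the whole-array rebuild-and-compare iteration by per-element step counting
-- (the answer is the maximum number of transform steps any single element needs).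

-- ===== PORT A =====
-- Python's `while True` is ported with fuel 2^33: on every input admitted by Dom_solution ∧
-- Pre_solution the loop reaches its fixpoint in far fewer rounds (proved below), so the
-- fuel-exhaustion branch is never taken on admitted inputs.
def solutionLoop : Nat → List Int → Int → Int
  | 0, _, cnt => cnt
  | fuel+1, arr, cnt =>
    let change := arr.foldl (fun acc i =>
      acc ++ [if i > 50 ∧ PySem.Int.mod i 2 = 0 then PySem.Int.floordiv i 2
              else if i < 50 ∧ PySem.Int.mod i 2 = 1 then i * 2 + 1
              else i]) []
    if arr ≠ change then solutionLoop fuel change (cnt + 1) else cnt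

def solution (arr : List Int) : Int := solutionLoop (2^33) arr 0

-- ===== PORT B =====
-- B's inner `while True` per element, ported with the same fuel device.
def stepsLoop : Nat → Int → Int → Int
  | 0, _, k => k
  | fuel+1, x, k =>
    let nxt := if x > 50 ∧ PySem.Int.mod x 2 = 0 then PySem.Int.floordiv x 2
               else if x < 50 ∧ PySem.Int.mod x 2 = 1 then x * 2 + 1
               else x
    if nxt = x then k else stepsLoop fuel nxt (k + 1)

def solution_alt (arr : List Int) : Int :=
  arr.foldl (fun best x =>
    let k := stepsLoop (2^33) x 0
    if k > best then k else best) 0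

-- ===== PRECONDITION & SPEC =====
-- Pre_ excludes exactly the inputs on which the Python A (and B) never terminates: any array
-- containing a negative odd element other than -1 makes the rule i*2+1 loop forever.
def Pre_solution (arr : List Int) : Prop :=
  ∀ i ∈ arr, ¬(i < 0 ∧ i ≠ -1 ∧ PySem.Int.mod i 2 = 1)
instance (arr : List Int) : Decidable (Pre_solution arr) := by unfold Pre_solution; infer_instance

def pvWitness_solution : List Int := [52, 3, -1, 0, 100]

def Spec_solution (arr : List Int) (out : Int) : Prop := out = solution_alt arr
instance (arr : List Int) (out : Int) : Decidable (Spec_solution arr out) := by unfold Spec_solution; infer_instance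

-- ===== CLAIM (what is proved, stated in full; the proofs are below) =====
def Claim_equal_solution : Prop := ∀ (arr : List Int), Dom_solution arr → Pre_solution arr → Spec_solution arr (solution arr)

-- ===== LEMMAS AND PROOFS =====

-- the transform applied to one element, in plain emod/ediv form
def fStep (x : Int) : Int :=
  if 50 < x ∧ x % 2 = 0 then x / 2
  else if x < 50 ∧ x % 2 = 1 then x * 2 + 1
  else x

-- an element the loops never spin on forever
def GoodI (x : Int) : Prop := ¬(x < 0 ∧ x ≠ -1 ∧ x % 2 = 1)

-- termination measure for one element
def muI (x : Int) : Nat :=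
  if 50 < x ∧ x % 2 = 0 then (x + 100).toNat
  else if 0 ≤ x ∧ x < 50 ∧ x % 2 = 1 then (50 - x).toNat
  else 0

theorem pvmod2 (x : Int) : PySem.Int.mod x 2 = x % 2 :=
  PySem.Int.mod_eq_emod_of_pos (by norm_num)

theorem pvdiv2 (x : Int) : PySem.Int.floordiv x 2 = x / 2 :=
  PySem.Int.floordiv_eq_ediv_of_pos (by norm_num)

theorem stepsLoop_succ (n : Nat) (x k : Int) :
    stepsLoop (n+1) x k = if fStep x = x then k else stepsLoop n (fStep x) (k+1) := by
  simp only [stepsLoop, fStep, pvmod2, pvdiv2]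

theorem foldl_change (arr : List Int) :
    arr.foldl (fun acc i =>
      acc ++ [if i > 50 ∧ PySem.Int.mod i 2 = 0 then PySem.Int.floordiv i 2
              else if i < 50 ∧ PySem.Int.mod i 2 = 1 then i * 2 + 1
              else i]) [] = arr.map fStep := by
  rw [PySem.List.foldl_append_singleton_eq_map]
  simp only [List.nil_append, pvmod2, pvdiv2]
  rfl

theorem solutionLoop_succ (n : Nat) (arr : List Int) (cnt : Int) :
    solutionLoop (n+1) arr cnt =
      if arr ≠ arr.map fStep then solutionLoop n (arr.map fStep) (cnt+1) else cnt := by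
  simp only [solutionLoop, foldl_change]

theorem good_step (x : Int) (hg : GoodI x) (hne : fStep x ≠ x) :
    GoodI (fStep x) ∧ muI (fStep x) < muI x := by
  by_cases hA : 50 < x ∧ x % 2 = 0
  · have hx : fStep x = x / 2 := by simp [fStep, hA]
    rw [hx]
    unfold GoodI muI at *
    constructor
    · omega
    · split_ifs <;> omega
  · by_cases hB : x < 50 ∧ x % 2 = 1
    · have hx : fStep x = x * 2 + 1 := by simp only [fStep, if_neg hA, if_pos hB]
      rw [hx] at hne ⊢
      unfold GoodI muI at *
      constructor
      · omega
      · split_ifs <;> omega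
    · exact absurd (by simp only [fStep, if_neg hA, if_neg hB]) hne

theorem map_fix_iff (l : List Int) : l.map fStep = l ↔ ∀ x ∈ l, fStep x = x := by
  induction l with
  | nil => simp
  | cons a t ih => simp [ih]

theorem stepsLoop_shift (fuel : Nat) : ∀ (x k : Int), stepsLoop fuel x k = k + stepsLoop fuel x 0 := by
  induction fuel with
  | zero => intro x k; simp [stepsLoop]
  | succ n ih =>
    intro x k
    rw [stepsLoop_succ, stepsLoop_succ]
    by_cases h : fStep x = x
    · simp [h]
    · rw [if_neg h, if_neg h, ih (fStep x) (k+1), ih (fStep x) (0+1)]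
      omega

theorem stepsLoop_nonneg (fuel : Nat) : ∀ (x : Int), 0 ≤ stepsLoop fuel x 0 := by
  induction fuel with
  | zero => intro x; simp [stepsLoop]
  | succ n ih =>
    intro x
    rw [stepsLoop_succ]
    by_cases h : fStep x = x
    · simp [h]
    · rw [if_neg h, stepsLoop_shift n (fStep x) (0+1)]
      have := ih (fStep x)
      omega

theorem stepsLoop_fuel_irrel (m : Nat) : ∀ (x : Int) (fuel fuel' : Nat), muI x = m → GoodI x →
    muI x < fuel → muI x < fuel' → stepsLoop fuel x 0 = stepsLoop fuel' x 0 := by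
  induction m using Nat.strong_induction_on with
  | _ m ih =>
    intro x fuel fuel' hm hg h1 h2
    obtain ⟨a, rfl⟩ : ∃ a, fuel = a + 1 := ⟨fuel - 1, by omega⟩
    obtain ⟨b, rfl⟩ : ∃ b, fuel' = b + 1 := ⟨fuel' - 1, by omega⟩
    rw [stepsLoop_succ, stepsLoop_succ]
    by_cases h : fStep x = x
    · rw [if_pos h, if_pos h]
    · rw [if_neg h, if_neg h]
      obtain ⟨hg', hlt⟩ := good_step x hg h
      rw [stepsLoop_shift a (fStep x) (0+1), stepsLoop_shift b (fStep x) (0+1)]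
      have := ih (muI (fStep x)) (by omega) (fStep x) a b rfl hg' (by omega) (by omega)
      omega

-- s x : the per-element step count with the port's fuel
def sI (x : Int) : Int := stepsLoop (2^33) x 0

theorem sI_fix {x : Int} (h : fStep x = x) : sI x = 0 := by
  rw [sI, show (2^33 : Nat) = (2^33 - 1) + 1 by norm_num, stepsLoop_succ, if_pos h]

theorem sI_move {x : Int} (hg : GoodI x) (hmu : muI x < 2^33) (h : fStep x ≠ x) :
    sI x = 1 + sI (fStep x) := by
  obtain ⟨hg', hlt⟩ := good_step x hg h
  rw [sI, show (2^33 : Nat) = (2^33 - 1) + 1 by norm_num, stepsLoop_succ, if_neg h,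
      stepsLoop_shift (2^33 - 1) (fStep x) (0+1)]
  have heq := stepsLoop_fuel_irrel (muI (fStep x)) (fStep x) (2^33 - 1) (2^33) rfl hg'
    (by omega) (by omega)
  rw [heq]
  rfl

def Mfold (l : List Int) : Int := l.foldl (fun a x => max a (sI x)) 0

theorem Mfold_hoist (l : List Int) : ∀ b : Int, 0 ≤ b → l.foldl (fun a x => max a (sI x)) b = max b (Mfold l) := by
  induction l with
  | nil => intro b hb; simp [Mfold]; omega
  | cons a t ih =>
    intro b hb
    have hs : (0:Int) ≤ sI a := stepsLoop_nonneg (2^33) a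
    simp only [Mfold, List.foldl_cons]
    rw [ih (max b (sI a)) (by omega), ih (max 0 (sI a)) (by omega)]
    omega

theorem Mfold_cons (x : Int) (t : List Int) : Mfold (x :: t) = max (sI x) (Mfold t) := by
  have hs : (0:Int) ≤ sI x := stepsLoop_nonneg (2^33) x
  simp only [Mfold, List.foldl_cons]
  rw [Mfold_hoist t (max 0 (sI x)) (by omega)]
  simp only [Mfold]
  omega

theorem Mfold_nonneg (l : List Int) : 0 ≤ Mfold l := by
  induction l with
  | nil => simp [Mfold]
  | cons a t ih =>
    have hs : (0:Int) ≤ sI a := stepsLoop_nonneg (2^33) a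
    rw [Mfold_cons]
    omega

theorem Mfold_zero (l : List Int) (h : ∀ x ∈ l, fStep x = x) : Mfold l = 0 := by
  induction l with
  | nil => simp [Mfold]
  | cons a t ih =>
    rw [Mfold_cons, sI_fix (h a (List.mem_cons_self)), ih (fun x hx => h x (List.mem_cons_of_mem a hx))]
    simp

theorem Mfold_step (l : List Int) (hg : ∀ x ∈ l, GoodI x ∧ muI x < 2^33)
    (hm : ∃ x ∈ l, fStep x ≠ x) : Mfold l = 1 + Mfold (l.map fStep) := by
  induction l with
  | nil => exact absurd hm (by simp)
  | cons a t ih =>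
    rw [Mfold_cons, List.map_cons, Mfold_cons]
    by_cases ha : fStep a = a
    · obtain ⟨x, hx, hxne⟩ := hm
      have hx' : x ∈ t := by
        rcases List.mem_cons.1 hx with rfl | h'
        · exact absurd ha hxne
        · exact h'
      rw [ha]
      have h0 : sI a = 0 := sI_fix ha
      have ht := ih (fun y hy => hg y (List.mem_cons_of_mem a hy)) ⟨x, hx', hxne⟩
      have hMn := Mfold_nonneg (t.map fStep)
      omega
    · obtain ⟨hga, hmua⟩ := hg a List.mem_cons_self
      have hsa : sI a = 1 + sI (fStep a) := sI_move hga hmua ha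
      have hfa0 : (0:Int) ≤ sI (fStep a) := stepsLoop_nonneg (2^33) (fStep a)
      by_cases hmt : ∃ x ∈ t, fStep x ≠ x
      · have ht := ih (fun y hy => hg y (List.mem_cons_of_mem a hy)) hmt
        have hMn := Mfold_nonneg (t.map fStep)
        omega
      · push Not at hmt
        have ht0 : Mfold t = 0 := Mfold_zero t hmt
        have ht0' : Mfold (t.map fStep) = 0 := by
          refine Mfold_zero _ ?_
          intro y hy
          obtain ⟨z, hz, rfl⟩ := List.mem_map.1 hy
          rw [hmt z hz]
          exact hmt z hz
        omega

theorem solutionLoop_eq (fuel : Nat) : ∀ (arr : List Int) (cnt : Int),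
    (∀ x ∈ arr, GoodI x ∧ muI x < 2^33 ∧ (fStep x = x ∨ muI x < fuel)) →
    solutionLoop fuel arr cnt = cnt + Mfold arr := by
  induction fuel with
  | zero =>
    intro arr cnt h
    have hfix : ∀ x ∈ arr, fStep x = x := by
      intro x hx
      rcases (h x hx).2.2 with h' | h'
      · exact h'
      · omega
    rw [Mfold_zero arr hfix]
    simp [solutionLoop]
  | succ n ih =>
    intro arr cnt h
    rw [solutionLoop_succ]
    by_cases heq : arr = arr.map fStep
    · rw [if_neg (fun hc => hc heq)]
      rw [Mfold_zero arr ((map_fix_iff arr).1 heq.symm)]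
      omega
    · rw [if_pos heq]
      have hmov : ∃ x ∈ arr, fStep x ≠ x := by
        by_contra hno
        push Not at hno
        exact heq ((map_fix_iff arr).2 hno).symm
      have hinv : ∀ y ∈ arr.map fStep, GoodI y ∧ muI y < 2^33 ∧ (fStep y = y ∨ muI y < n) := by
        intro y hy
        obtain ⟨x, hx, rfl⟩ := List.mem_map.1 hy
        obtain ⟨hgx, hmux, hx3⟩ := h x hx
        by_cases hfx : fStep x = x
        · rw [hfx]
          exact ⟨hgx, hmux, Or.inl hfx⟩
        · obtain ⟨hg', hlt⟩ := good_step x hgx hfx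
          have hx3' : muI x < n + 1 := by
            rcases hx3 with h' | h'
            · exact absurd h' hfx
            · exact h'
          exact ⟨hg', by omega, Or.inr (by omega)⟩
      rw [ih (arr.map fStep) (cnt+1) hinv,
          Mfold_step arr (fun x hx => ⟨(h x hx).1, (h x hx).2.1⟩) hmov]
      omega

theorem alt_eq_Mfold (arr : List Int) : solution_alt arr = Mfold arr := by
  have hf : (fun (best x : Int) => if stepsLoop (2^33) x 0 > best then stepsLoop (2^33) x 0 else best)
      = fun (a x : Int) => max a (sI x) := by
    funext a x
    simp only [sI]
    split_ifs <;> omega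
  simp only [solution_alt, Mfold]
  rw [hf]

-- ===== VERDICT (by name: the statement is the Claim_ definition above) =====
theorem solution_spec : Claim_equal_solution := by
  intro arr hdom hpre
  have hb : ∀ x ∈ arr, -2147483648 ≤ x ∧ x ≤ 2147483648 := by
    simp only [Dom_solution, List.all_eq_true, pvDomInt, decide_eq_true_eq] at hdom
    exact hdom
  have hx : ∀ x ∈ arr, GoodI x ∧ muI x < 2^33 ∧ (fStep x = x ∨ muI x < 2^33) := by
    intro x hxm
    have hpx := hpre x hxm
    rw [pvmod2] at hpx
    have hbx := hb x hxm
    have hmu : muI x < 2^33 := by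
      unfold muI
      split_ifs <;> omega
    exact ⟨hpx, hmu, Or.inr hmu⟩
  show solution arr = solution_alt arr
  rw [show solution arr = solutionLoop (2^33) arr 0 from rfl,
      solutionLoop_eq (2^33) arr 0 hx, alt_eq_Mfold]
  omega
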